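-- pv_equiv track=rewrite | github.com/ivenpoker/Python-Projects | Projects/Online Workouts/w3resource/Basic - Part-II/program-11.py | find_sum_to_target
-- ===== SOURCE A (Python) =====
-- def find_sum_to_target(target, listA=[], listB=[], listC=[]):
--     data = []  # list of tuples (triplets) whose sum equals 'target'
--
--     for x in range(len(listA)):
--         for y in range(len(listB)):
--             for z in range(len(listC)):
--                 temp = int(listA[x]) + int(listB[y]) + int(listC[z])
--                 if temp == target:
--                     data.append(tuple([listA[x], listB[y], listC[z]]))
--
--     return data
-- ===== SOURCE B (Python) =====
-- def find_sum_to_target(target, listA=[], listB=[], listC=[]):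
--     counts = {}
--     for c in listC:
--         counts[c] = counts.get(c, 0) + 1
--     data = []
--     for a in listA:
--         for b in listB:
--             c = target - a - b
--             for _ in range(counts.get(c, 0)):
--                 data.append((a, b, c))
--     return data
-- ===== Notes on version B (the rewrite author's own statement) =====
-- stated objective: faster
-- what changed: Replaced the triple nested scan with a counting dict over listC built once, then a per-(a,b) O(1) lookup of the complement's multiplicity.
import Mathlib
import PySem

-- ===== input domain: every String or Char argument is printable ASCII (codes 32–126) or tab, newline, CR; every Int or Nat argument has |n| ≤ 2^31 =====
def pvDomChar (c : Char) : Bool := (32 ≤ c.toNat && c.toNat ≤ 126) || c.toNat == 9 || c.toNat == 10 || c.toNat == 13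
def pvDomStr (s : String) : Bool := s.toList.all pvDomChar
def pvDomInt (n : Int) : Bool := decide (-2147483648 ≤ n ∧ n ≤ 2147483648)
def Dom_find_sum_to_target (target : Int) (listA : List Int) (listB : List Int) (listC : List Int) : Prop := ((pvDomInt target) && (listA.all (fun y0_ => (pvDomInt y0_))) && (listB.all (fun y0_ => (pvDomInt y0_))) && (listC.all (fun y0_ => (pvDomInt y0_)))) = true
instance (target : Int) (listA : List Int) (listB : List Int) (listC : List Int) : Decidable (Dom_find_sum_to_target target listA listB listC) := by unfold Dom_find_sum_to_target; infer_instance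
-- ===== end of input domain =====

-- B replaces A's triple nested scan by a counting dict over listC and a complement lookup per (a,b) pair (objective: faster, asymptotic).

-- ===== PORT A =====
-- triple index loop; data.append on sum match
def find_sum_to_target (target : Int) (listA : List Int) (listB : List Int) (listC : List Int) : List (List Int) :=
  (PySem.List.pyRange 0 (listA.length : Int) 1).foldl (fun data x =>
    (PySem.List.pyRange 0 (listB.length : Int) 1).foldl (fun data y =>
      (PySem.List.pyRange 0 (listC.length : Int) 1).foldl (fun data z =>
        let temp := PySem.List.pyGetD listA x 0 + PySem.List.pyGetD listB y 0 + PySem.List.pyGetD listC z 0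
        if temp = target then
          data ++ [[PySem.List.pyGetD listA x 0, PySem.List.pyGetD listB y 0, PySem.List.pyGetD listC z 0]]
        else data) data) data) []

-- ===== PORT B =====
-- counts[c] = counts.get(c, 0) + 1 over listC; then per (a,b) append the complement counts.get(c,0) times
def find_sum_to_target_alt (target : Int) (listA : List Int) (listB : List Int) (listC : List Int) : List (List Int) :=
  let counts : PySem.Dict Int Int :=
    listC.foldl (fun d c => d.insert c (d.getD c 0 + 1)) PySem.Dict.empty
  listA.foldl (fun data a =>
    listB.foldl (fun data b =>
      let c := target - a - b
      (PySem.List.pyRange 0 (counts.getD c 0) 1).foldl (fun data _ => data ++ [[a, b, c]]) data) data) []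

-- ===== PRECONDITION & SPEC =====
def Spec_find_sum_to_target (target : Int) (listA : List Int) (listB : List Int) (listC : List Int) (out : List (List Int)) : Prop := out = find_sum_to_target_alt target listA listB listC
instance (target : Int) (listA : List Int) (listB : List Int) (listC : List Int) (out : List (List Int)) : Decidable (Spec_find_sum_to_target target listA listB listC out) := by unfold Spec_find_sum_to_target; infer_instance

-- ===== CLAIM (what is proved, stated in full; the proofs are below) =====
def Claim_equal_find_sum_to_target : Prop := ∀ (target : Int) (listA : List Int) (listB : List Int) (listC : List Int), Dom_find_sum_to_target target listA listB listC → Spec_find_sum_to_target target listA listB listC (find_sum_to_target target listA listB listC)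

-- ===== LEMMAS AND PROOFS =====

-- a fold that appends the same element once per step = append replicate
lemma foldl_append_const {α β : Type} (l : List β) (x : α) :
    ∀ (data : List α), l.foldl (fun d _ => d ++ [x]) data = data ++ List.replicate l.length x := by
  induction l with
  | nil => intro data; simp
  | cons h t ih => intro data; simp [List.foldl, ih, List.replicate_succ, List.append_assoc]

-- A's inner z-loop collects one triple per occurrence of the complement in xs
lemma inner_loop_eq (t a b : Int) (xs : List Int) :
    ∀ (data : List (List Int)),
      xs.foldl (fun d c => if a + b + c = t then d ++ [[a, b, c]] else d) data
        = data ++ List.replicate (xs.count (t - a - b)) [a, b, t - a - b] := by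
  induction xs with
  | nil => intro data; simp
  | cons h tl ih =>
    intro data
    simp only [List.foldl, List.count_cons]
    by_cases hc : a + b + h = t
    · have hh : h = t - a - b := by omega
      subst hh
      simp [ih, List.replicate_succ, List.append_assoc]
    · have hh : ¬ ((h == t - a - b) = true) := by
        simp only [beq_iff_eq]; omega
      simp [hc, ih, hh]

-- ===== VERDICT (by name: the statement is the Claim_ definition above) =====
theorem find_sum_to_target_spec : Claim_equal_find_sum_to_target := by
  intro target listA listB listC _
  show find_sum_to_target target listA listB listC = find_sum_to_target_alt target listA listB listC
  unfold find_sum_to_target find_sum_to_target_alt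
  rw [PySem.List.foldl_pyRange_zero_pyGetD' listA 0
    (fun data a =>
      (PySem.List.pyRange 0 (listB.length : Int) 1).foldl (fun data y =>
        (PySem.List.pyRange 0 (listC.length : Int) 1).foldl (fun data z =>
          let temp := a + PySem.List.pyGetD listB y 0 + PySem.List.pyGetD listC z 0
          if temp = target then
            data ++ [[a, PySem.List.pyGetD listB y 0, PySem.List.pyGetD listC z 0]]
          else data) data) data)
    []]
  congr 1
  funext data a
  rw [PySem.List.foldl_pyRange_zero_pyGetD' listB 0
    (fun data b =>
      (PySem.List.pyRange 0 (listC.length : Int) 1).foldl (fun data z =>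
        let temp := a + b + PySem.List.pyGetD listC z 0
        if temp = target then data ++ [[a, b, PySem.List.pyGetD listC z 0]] else data) data)
    data]
  congr 1
  funext data b
  rw [PySem.List.foldl_pyRange_zero_pyGetD' listC 0
    (fun data c =>
      let temp := a + b + c
      if temp = target then data ++ [[a, b, c]] else data)
    data]
  rw [inner_loop_eq target a b listC data]
  show _ = (PySem.List.pyRange 0
      ((listC.foldl (fun d c => d.insert c (d.getD c 0 + 1)) PySem.Dict.empty).getD (target - a - b) 0)
      1).foldl (fun data _ => data ++ [[a, b, target - a - b]]) data
  rw [PySem.Dict.getD_foldl_insert_add_one, foldl_append_const]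
  congr 1
  simp [PySem.List.pyRange_one, PySem.Dict.getD_empty]
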